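-- pv_equiv track=rewrite | github.com/hding49/lcPractice | affirm/phone screen/shopping-pattern.py | shopping_patterns_dict
-- ===== SOURCE A (Python) =====
-- def shopping_patterns_dict(records):
--     all_stores = set()                         # 收集出现过的所有店铺，用 set 去重
--     for rec in records:                        # 遍历每条会话
--         for s in rec:                          # 遍历会话中的每个店
--             all_stores.add(s)                  # 加入全集，后面用于确定目标店铺及其字典序
--
--     if not all_stores:                         # 若完全没有店铺（空输入或全是空会话）
--         return {}                              # 按字典输出格式返回空 dict
--
--     from collections import defaultdict        # 延迟导入（也可以放到文件顶部）
--     from itertools import combinations         # 用于生成会话内的所有无序店铺对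
--
--     counts = defaultdict(lambda: defaultdict(int))  # 二层计数字典：counts[a][b] = a与b共现次数（默认0）
--     for rec in records:                             # 再次遍历每条会话，做共现统计
--         unique = list(set(rec))                     # 会话内去重：同一店在同一会话出现多次只算一次
--         if len(unique) < 2:                         # 空会话或只有一个店的会话不产生“店铺对”
--             continue
--         for x, y in combinations(unique, 2):        # 为该会话生成所有无序不重复的店铺对
--             counts[x][y] += 1                       # 双向计数：x与y共现+1
--             counts[y][x] += 1                       # 让以后以任意一方为“目标店”都能直接读到邻居频次
--
--     result = {}                                     # 准备输出的 dict：store -> 关联店名的有序列表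
--     for store in sorted(all_stores):                # 目标店铺按字典序（题目要求2）
--         neighbors = counts[store]                   # 邻居频次表：neighbor -> freq
--                                                     # 注意：defaultdict 即使之前没记录过也会给个空 dict
--         if not neighbors:                           # 没有任何共现对象（如只有一个店多次出现的情况）
--             result[store] = []                      # 该目标店对应空列表（题目示例2）
--         else:
--             sorted_neighbors = sorted(              # 对邻居排序（题目要求3）
--                 neighbors.items(),                  # 每个元素是 (店名, 次数)
--                 key=lambda kv: (-kv[1], kv[0])      # 先“次数降序”（负号），再“店名字典序升序”打破平手
--             )
--             result[store] = [name for name, _ in sorted_neighbors]  # 只保留店名，不带次数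
--
--     return result                                   # 返回字典格式的最终结果
-- ===== SOURCE B (Python) =====
-- def shopping_patterns_dict(records):
--     # Inverted index: store -> set of session ids; co-occurrence frequency of two
--     # stores is the size of the intersection of their session-id sets.
--     occ = {}
--     for i, rec in enumerate(records):
--         for s in rec:
--             occ.setdefault(s, set()).add(i)
--     result = {}
--     for s in sorted(occ):
--         pairs = [(t, len(occ[s] & occ[t])) for t in occ if t != s]
--         good = [(t, c) for (t, c) in pairs if c > 0]
--         good.sort(key=lambda kv: (-kv[1], kv[0]))
--         result[s] = [t for t, _ in good]
--     return result
-- ===== Notes on version B (the rewrite author's own statement) =====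
-- stated objective: alternative
-- what changed: Replaces A's per-session pair enumeration (itertools.combinations into a symmetric nested count dict) with an inverted index from store to the set of session ids it appears in; the co-occurrence frequency of two stores is then computed as the size of the intersection of their session-id sets.
import Mathlib
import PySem

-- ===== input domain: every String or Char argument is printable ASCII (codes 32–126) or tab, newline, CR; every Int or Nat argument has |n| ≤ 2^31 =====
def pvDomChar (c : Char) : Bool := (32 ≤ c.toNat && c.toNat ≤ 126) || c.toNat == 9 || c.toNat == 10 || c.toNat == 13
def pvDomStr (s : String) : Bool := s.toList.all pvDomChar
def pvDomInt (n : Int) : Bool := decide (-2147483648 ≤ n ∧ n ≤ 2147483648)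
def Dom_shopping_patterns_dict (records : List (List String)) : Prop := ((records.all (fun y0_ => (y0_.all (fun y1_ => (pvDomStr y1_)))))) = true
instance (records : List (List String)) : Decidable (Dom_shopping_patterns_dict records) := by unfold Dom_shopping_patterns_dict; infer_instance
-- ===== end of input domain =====

-- B replaces A's per-session pair enumeration (combinations into a symmetric nested count dict)
-- by an inverted index store -> set of session ids; the co-occurrence frequency of two stores is
-- the size of the intersection of their session-id sets (objective: alternative algorithm; it
-- trades per-session pair enumeration for per-store-pair set intersections, not speed).

-- ===== PORT A =====
-- counts[x][y] += 1 on the two-level defaultdict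
def pvBumpA (c : PySem.Dict String (PySem.Dict String Int)) (x y : String) :
    PySem.Dict String (PySem.Dict String Int) :=
  c.modify x PySem.Dict.empty (fun inner => inner.modify y 0 (· + 1))

-- for x, y in combinations(unique, 2): counts[x][y] += 1; counts[y][x] += 1
def pvPairFoldA (u : List String) (c : PySem.Dict String (PySem.Dict String Int)) :
    PySem.Dict String (PySem.Dict String Int) :=
  (PySem.List.combinations u 2).foldl
    (fun c p =>
      match p with
      | [x, y] => pvBumpA (pvBumpA c x y) y x
      | _ => c) c

-- one iteration of A's counting loop over records
def pvStepA (c : PySem.Dict String (PySem.Dict String Int)) (rec : List String) :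
    PySem.Dict String (PySem.Dict String Int) :=
  let unique : List String := PySem.Set.ofList rec
  if unique.length < 2 then c else pvPairFoldA unique c

def shopping_patterns_dict (records : List (List String)) : List (String × List String) :=
  let all_stores : PySem.Set String :=
    records.foldl (fun acc rec => rec.foldl (fun a s => PySem.Set.add a s) acc) PySem.Set.empty
  if all_stores = [] then []
  else
    let counts := records.foldl pvStepA PySem.Dict.empty
    (PySem.List.sorted all_stores (fun s => s)).foldl
      (fun res store =>
        let neighbors := counts.getD store PySem.Dict.empty
        if neighbors.items = [] then res ++ [(store, [])]
        else res ++ [(store,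
          (PySem.List.sorted2 neighbors.items (fun kv => -kv.2) (fun kv => kv.1)).map
            (fun kv => kv.1))]) []

-- ===== PORT B =====
-- for i, rec in enumerate(records): for s in rec: occ.setdefault(s, set()).add(i)
def pvOccStep (d : PySem.Dict String (PySem.Set Int)) (p : Int × List String) :
    PySem.Dict String (PySem.Set Int) :=
  p.2.foldl (fun d s => d.modify s PySem.Set.empty (fun st => PySem.Set.add st p.1)) d

def shopping_patterns_dict_alt (records : List (List String)) : List (String × List String) :=
  let occ := (PySem.List.enumerate records 0).foldl pvOccStep PySem.Dict.empty
  (PySem.List.sorted occ.keys (fun s => s)).foldl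
    (fun res s =>
      let pairs := (occ.keys.filter (fun t => !(t == s))).map
        (fun t => (t, PySem.Set.len
          (PySem.Set.inter (occ.getD s PySem.Set.empty) (occ.getD t PySem.Set.empty))))
      let good := pairs.filter (fun kv => decide (0 < kv.2))
      res ++ [(s, (PySem.List.sorted2 good (fun kv => -kv.2) (fun kv => kv.1)).map
        (fun kv => kv.1))]) []

-- ===== PRECONDITION & SPEC =====
def Spec_shopping_patterns_dict (records : List (List String)) (out : List (String × List String)) : Prop := out = shopping_patterns_dict_alt records
instance (records : List (List String)) (out : List (String × List String)) : Decidable (Spec_shopping_patterns_dict records out) := by unfold Spec_shopping_patterns_dict; infer_instance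

-- ===== CLAIM (what is proved, stated in full; the proofs are below) =====
def Claim_equal_shopping_patterns_dict : Prop := ∀ (records : List (List String)), Dom_shopping_patterns_dict records → Spec_shopping_patterns_dict records (shopping_patterns_dict records)

-- ===== LEMMAS AND PROOFS =====

-- number of sessions in which both s and t occur
def pvN (records : List (List String)) (s t : String) : Nat :=
  records.countP (fun rec => decide (s ∈ rec) && decide (t ∈ rec))

-- session indices (from n on) whose record contains s
def pvIdx : List (List String) → String → Int → List Int
  | [], _, _ => []
  | r :: rs, s, n => (if s ∈ r then [n] else []) ++ pvIdx rs s (n + 1)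

theorem pv_sorted2_eq {α : Type} (xs : List α) (k1 : α → Int) (k2 : α → String) :
    PySem.List.sorted2 xs k1 k2 = PySem.List.sorted xs (fun x => toLex (k1 x, k2 x)) := by
  unfold PySem.List.sorted2 PySem.List.sorted
  simp only [if_neg (by decide : ¬ (false = true))]
  congr 1
  funext acc x
  congr 1
  funext a b
  rcases lt_trichotomy (k1 a) (k1 b) with h1 | h1 | h1
  · simp [Prod.Lex.lt_iff, h1]
  · simp [Prod.Lex.lt_iff, h1]
  · simp [Prod.Lex.lt_iff, h1, h1.ne', (not_lt_of_gt h1 : ¬ k1 a < k1 b)]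

theorem pv_get?_eq {κ ν : Type} [BEq κ] (d : PySem.Dict κ ν) (k : κ) (d0 : ν) :
    d.get? k = if d.contains k = true then some (d.getD k d0) else none := by
  rw [PySem.Dict.contains_eq_isSome_get?, PySem.Dict.getD_eq_get?_getD]
  cases h : d.get? k <;> simp

theorem pv_two_mem_length {α : Type} (l : List α) (s t : α) (hs : s ∈ l) (ht : t ∈ l)
    (hne : s ≠ t) : 2 ≤ l.length := by
  match l with
  | [] => simp at hs
  | [a] => simp at hs ht; exact absurd (hs.trans ht.symm) hne
  | a :: b :: l => simp

theorem pv_key_inj : Function.Injective (fun kv : String × Int => toLex (-kv.2, kv.1)) := by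
  rintro ⟨k1, v1⟩ ⟨k2, v2⟩ h
  simp only [toLex_inj, Prod.mk.injEq] at h
  obtain ⟨h1, h2⟩ := h
  exact Prod.ext h2 (by omega)

-- ==== A side ====

theorem pv_bump_getD (c : PySem.Dict String (PySem.Dict String Int)) (x y s t : String) :
    ((pvBumpA c x y).getD s PySem.Dict.empty).getD t 0
      = (c.getD s PySem.Dict.empty).getD t 0 + (if s = x ∧ t = y then 1 else 0) := by
  unfold pvBumpA
  rw [PySem.Dict.getD_modify]
  by_cases hs : s = x
  · subst hs
    rw [if_pos rfl, PySem.Dict.getD_modify]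
    by_cases ht : t = y <;> simp [ht]
  · simp [hs]

theorem pv_bump_contains (c : PySem.Dict String (PySem.Dict String Int)) (x y s t : String) :
    (((pvBumpA c x y).getD s PySem.Dict.empty).contains t = true)
      ↔ ((c.getD s PySem.Dict.empty).contains t = true ∨ (s = x ∧ t = y)) := by
  unfold pvBumpA
  rw [PySem.Dict.getD_modify]
  by_cases hs : s = x
  · subst hs
    rw [if_pos rfl, PySem.Dict.contains_modify]
    by_cases ht : t = y <;> simp [ht]
  · simp [hs]

theorem pv_bump_nodup (c : PySem.Dict String (PySem.Dict String Int)) (x y s : String)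
    (h : ∀ s', ((c.getD s' PySem.Dict.empty).keys).Nodup) :
    ((pvBumpA c x y).getD s PySem.Dict.empty).keys.Nodup := by
  unfold pvBumpA
  rw [PySem.Dict.getD_modify]
  by_cases hs : s = x
  · subst hs
    rw [if_pos rfl, PySem.Dict.keys_modify]
    exact PySem.Dict.nodup_keys_insert _ _ _ (h s)
  · simp [hs, h s]

-- double bump: counts[x][y] += 1; counts[y][x] += 1
theorem pv_dbump_getD (c : PySem.Dict String (PySem.Dict String Int)) (x y s t : String) :
    ((pvBumpA (pvBumpA c x y) y x).getD s PySem.Dict.empty).getD t 0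
      = (c.getD s PySem.Dict.empty).getD t 0
        + ((if s = x ∧ t = y then 1 else 0) + (if s = y ∧ t = x then 1 else 0)) := by
  rw [pv_bump_getD, pv_bump_getD]; ring

theorem pv_dbump_contains (c : PySem.Dict String (PySem.Dict String Int)) (x y s t : String) :
    (((pvBumpA (pvBumpA c x y) y x).getD s PySem.Dict.empty).contains t = true)
      ↔ ((c.getD s PySem.Dict.empty).contains t = true ∨ (s = x ∧ t = y) ∨ (s = y ∧ t = x)) := by
  rw [pv_bump_contains, pv_bump_contains]; tauto

-- fold of the double bump with fixed x over the tail xs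
theorem pv_foldx_getD (xs : List String) (x : String)
    (c : PySem.Dict String (PySem.Dict String Int)) (s t : String)
    (hx : x ∉ xs) (hnd : xs.Nodup) :
    (((xs.foldl (fun c y => pvBumpA (pvBumpA c x y) y x) c).getD s PySem.Dict.empty).getD t 0)
      = (c.getD s PySem.Dict.empty).getD t 0
        + (if (s = x ∧ t ∈ xs) ∨ (t = x ∧ s ∈ xs) then 1 else 0) := by
  induction xs generalizing c with
  | nil => simp
  | cons y ys ih =>
    simp only [List.foldl_cons]
    rw [ih _ (by simp at hx; tauto) hnd.of_cons, pv_dbump_getD]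
    have hxy : x ≠ y := by simp at hx; tauto
    have hxys : x ∉ ys := by simp at hx; tauto
    have hyys : y ∉ ys := by simp at hnd; tauto
    by_cases h1 : s = x <;> by_cases h2 : t = x <;> by_cases h3 : s = y <;> by_cases h4 : t = y <;>
      by_cases h5 : s ∈ ys <;> by_cases h6 : t ∈ ys <;>
      simp_all

theorem pv_foldx_contains (xs : List String) (x : String)
    (c : PySem.Dict String (PySem.Dict String Int)) (s t : String)
    (hx : x ∉ xs) :
    ((((xs.foldl (fun c y => pvBumpA (pvBumpA c x y) y x) c).getD s PySem.Dict.empty).contains t) = true)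
      ↔ ((c.getD s PySem.Dict.empty).contains t = true
          ∨ (s = x ∧ t ∈ xs) ∨ (t = x ∧ s ∈ xs)) := by
  induction xs generalizing c with
  | nil => simp
  | cons y ys ih =>
    simp only [List.foldl_cons]
    rw [ih _ (by simp at hx; tauto), pv_dbump_contains]
    simp only [List.mem_cons]
    tauto

theorem pv_foldx_nodup (xs : List String) (x : String)
    (c : PySem.Dict String (PySem.Dict String Int)) (s : String)
    (h : ∀ s', ((c.getD s' PySem.Dict.empty).keys).Nodup) :
    (((xs.foldl (fun c y => pvBumpA (pvBumpA c x y) y x) c).getD s PySem.Dict.empty).keys).Nodup := by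
  induction xs generalizing c with
  | nil => exact h s
  | cons y ys ih =>
    simp only [List.foldl_cons]
    exact ih _ (fun s' => pv_bump_nodup _ _ _ _ (fun s'' => pv_bump_nodup _ _ _ _ h))

theorem pv_pairfold_cons (x : String) (xs : List String)
    (c : PySem.Dict String (PySem.Dict String Int)) :
    pvPairFoldA (x :: xs) c
      = pvPairFoldA xs (xs.foldl (fun c y => pvBumpA (pvBumpA c x y) y x) c) := by
  unfold pvPairFoldA
  rw [PySem.List.combinations_cons_succ, List.foldl_append, PySem.List.combinations_one,
    List.map_map, List.foldl_map]
  rfl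

theorem pv_pairs_getD (u : List String) (c : PySem.Dict String (PySem.Dict String Int))
    (s t : String) (h : u.Nodup) :
    ((pvPairFoldA u c).getD s PySem.Dict.empty).getD t 0
      = (c.getD s PySem.Dict.empty).getD t 0 + (if s ∈ u ∧ t ∈ u ∧ s ≠ t then 1 else 0) := by
  induction u generalizing c with
  | nil => simp [pvPairFoldA, PySem.List.combinations_nil_succ]
  | cons x xs ih =>
    rw [pv_pairfold_cons, ih _ h.of_cons,
      pv_foldx_getD _ _ _ _ _ (by simp at h; tauto) h.of_cons]
    have hx : x ∉ xs := by simp at h; tauto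
    by_cases h1 : s = x <;> by_cases h2 : t = x <;> by_cases h3 : s ∈ xs <;>
      by_cases h4 : t ∈ xs <;> by_cases h5 : s = t <;> simp_all

theorem pv_pairs_contains (u : List String) (c : PySem.Dict String (PySem.Dict String Int))
    (s t : String) (h : u.Nodup) :
    (((pvPairFoldA u c).getD s PySem.Dict.empty).contains t = true)
      ↔ ((c.getD s PySem.Dict.empty).contains t = true ∨ (s ∈ u ∧ t ∈ u ∧ s ≠ t)) := by
  induction u generalizing c with
  | nil => simp [pvPairFoldA, PySem.List.combinations_nil_succ]
  | cons x xs ih =>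
    rw [pv_pairfold_cons, ih _ h.of_cons,
      pv_foldx_contains _ _ _ _ _ (by simp at h; tauto)]
    have hx : x ∉ xs := by simp at h; tauto
    by_cases hc : (c.getD s PySem.Dict.empty).contains t = true <;>
      by_cases h1 : s = x <;> by_cases h2 : t = x <;> by_cases h3 : s ∈ xs <;>
      by_cases h4 : t ∈ xs <;> by_cases h5 : s = t <;> simp_all

theorem pv_pairs_nodup (u : List String) (c : PySem.Dict String (PySem.Dict String Int))
    (s : String) (h : ∀ s', ((c.getD s' PySem.Dict.empty).keys).Nodup) :
    ((pvPairFoldA u c).getD s PySem.Dict.empty).keys.Nodup := by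
  induction u generalizing c with
  | nil => simp [pvPairFoldA, PySem.List.combinations_nil_succ]; exact h s
  | cons x xs ih =>
    rw [pv_pairfold_cons]
    exact ih _ (fun s' => pv_foldx_nodup _ _ _ _ h)

theorem pv_stepA_getD (c : PySem.Dict String (PySem.Dict String Int)) (rec : List String)
    (s t : String) :
    ((pvStepA c rec).getD s PySem.Dict.empty).getD t 0
      = (c.getD s PySem.Dict.empty).getD t 0
        + (if s ∈ rec ∧ t ∈ rec ∧ s ≠ t then 1 else 0) := by
  unfold pvStepA
  by_cases hg : (PySem.Set.ofList rec).length < 2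
  · simp only [hg, if_pos]
    have : ¬ (s ∈ rec ∧ t ∈ rec ∧ s ≠ t) := by
      rintro ⟨hs, ht, hne⟩
      exact absurd (pv_two_mem_length (PySem.Set.ofList rec) s t
        ((PySem.Set.mem_ofList _ _).mpr hs) ((PySem.Set.mem_ofList _ _).mpr ht) hne) (by omega)
    simp [this]
  · simp only [hg, if_false]
    rw [pv_pairs_getD _ _ _ _ (PySem.Set.nodup_ofList rec)]
    simp [PySem.Set.mem_ofList]

theorem pv_stepA_contains (c : PySem.Dict String (PySem.Dict String Int)) (rec : List String)
    (s t : String) :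
    (((pvStepA c rec).getD s PySem.Dict.empty).contains t = true)
      ↔ ((c.getD s PySem.Dict.empty).contains t = true ∨ (s ∈ rec ∧ t ∈ rec ∧ s ≠ t)) := by
  unfold pvStepA
  by_cases hg : (PySem.Set.ofList rec).length < 2
  · simp only [hg, if_pos]
    have : ¬ (s ∈ rec ∧ t ∈ rec ∧ s ≠ t) := by
      rintro ⟨hs, ht, hne⟩
      exact absurd (pv_two_mem_length (PySem.Set.ofList rec) s t
        ((PySem.Set.mem_ofList _ _).mpr hs) ((PySem.Set.mem_ofList _ _).mpr ht) hne) (by omega)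
    simp [this]
  · simp only [hg, if_false]
    rw [pv_pairs_contains _ _ _ _ (PySem.Set.nodup_ofList rec)]
    simp [PySem.Set.mem_ofList]

theorem pv_stepA_nodup (c : PySem.Dict String (PySem.Dict String Int)) (rec : List String)
    (s : String) (h : ∀ s', ((c.getD s' PySem.Dict.empty).keys).Nodup) :
    ((pvStepA c rec).getD s PySem.Dict.empty).keys.Nodup := by
  unfold pvStepA
  by_cases hg : (PySem.Set.ofList rec).length < 2
  · simp only [hg, if_pos]; exact h s
  · simp only [hg, if_false]; exact pv_pairs_nodup _ _ _ h

theorem pv_countsA_getD (records : List (List String))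
    (c : PySem.Dict String (PySem.Dict String Int)) (s t : String) :
    ((records.foldl pvStepA c).getD s PySem.Dict.empty).getD t 0
      = (c.getD s PySem.Dict.empty).getD t 0
        + (if s ≠ t then (pvN records s t : Int) else 0) := by
  induction records generalizing c with
  | nil => simp [pvN]
  | cons r rs ih =>
    simp only [List.foldl_cons]
    rw [ih, pv_stepA_getD]
    have : pvN (r :: rs) s t = (if s ∈ r ∧ t ∈ r then 1 else 0) + pvN rs s t := by
      simp only [pvN, List.countP_cons]
      by_cases h : s ∈ r ∧ t ∈ r
      · simp [h]
        omega
      · simp [h]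
    rw [this]
    by_cases h1 : s = t <;> by_cases h2 : s ∈ r ∧ t ∈ r <;> simp_all <;> ring

theorem pv_countsA_contains (records : List (List String))
    (c : PySem.Dict String (PySem.Dict String Int)) (s t : String) :
    (((records.foldl pvStepA c).getD s PySem.Dict.empty).contains t = true)
      ↔ ((c.getD s PySem.Dict.empty).contains t = true ∨ (s ≠ t ∧ 0 < pvN records s t)) := by
  induction records generalizing c with
  | nil => simp [pvN]
  | cons r rs ih =>
    simp only [List.foldl_cons]
    rw [ih, pv_stepA_contains]
    have : (0 < pvN (r :: rs) s t) ↔ ((s ∈ r ∧ t ∈ r) ∨ 0 < pvN rs s t) := by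
      simp only [pvN, List.countP_cons]
      by_cases h : s ∈ r ∧ t ∈ r <;> simp [h]
    rw [this]
    tauto

theorem pv_countsA_nodup (records : List (List String))
    (c : PySem.Dict String (PySem.Dict String Int)) (s : String)
    (h : ∀ s', ((c.getD s' PySem.Dict.empty).keys).Nodup) :
    ((records.foldl pvStepA c).getD s PySem.Dict.empty).keys.Nodup := by
  induction records generalizing c with
  | nil => exact h s
  | cons r rs ih =>
    simp only [List.foldl_cons]
    exact ih _ (fun s' => pv_stepA_nodup _ _ _ h)

theorem pv_countsA_get? (records : List (List String)) (s t : String) :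
    ((records.foldl pvStepA PySem.Dict.empty).getD s PySem.Dict.empty).get? t
      = if s ≠ t ∧ 0 < pvN records s t then some ((pvN records s t : Int)) else none := by
  rw [pv_get?_eq _ _ (0 : Int)]
  by_cases h : s ≠ t ∧ 0 < pvN records s t
  · rw [if_pos h, if_pos]
    · rw [pv_countsA_getD]
      simp [h.1, PySem.Dict.getD_empty]
    · rw [pv_countsA_contains]
      exact Or.inr h
  · rw [if_neg h, if_neg]
    rw [pv_countsA_contains]
    simp only [PySem.Dict.getD_empty, PySem.Dict.contains_empty]
    simpa using h

-- ==== B side ====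

-- every index recorded from n on is ≥ n
theorem pv_idx_lb (records : List (List String)) (s : String) (n i : Int)
    (h : i ∈ pvIdx records s n) : n ≤ i := by
  induction records generalizing n with
  | nil => simp [pvIdx] at h
  | cons r rs ih =>
    simp only [pvIdx, List.mem_append] at h
    rcases h with h | h
    · split at h <;> simp_all
    · have := ih (n + 1) h; omega

-- the inner loop 'for s in rec: occ.setdefault(s, set()).add(i)'
theorem pv_occInner_getD (r : List String) (i : Int)
    (d : PySem.Dict String (PySem.Set Int)) (s : String) :
    ((r.foldl (fun d s => d.modify s PySem.Set.empty (fun st => PySem.Set.add st i)) d).getD s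
        PySem.Set.empty)
      = if s ∈ r then PySem.Set.add (d.getD s PySem.Set.empty) i
        else d.getD s PySem.Set.empty := by
  induction r generalizing d with
  | nil => simp
  | cons x xs ih =>
    simp only [List.foldl_cons]
    rw [ih]
    by_cases hs : s ∈ xs
    · rw [if_pos hs, PySem.Dict.getD_modify]
      by_cases hx : s = x
      · subst hx
        simp
      · simp [hx, hs]
    · rw [if_neg hs, PySem.Dict.getD_modify]
      by_cases hx : s = x
      · subst hx; simp [hs]
      · simp [hx, hs]

-- the whole build loop: occ[s] is the list of session indices containing s, in order
theorem pv_occ_getD (records : List (List String)) (n : Int)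
    (d : PySem.Dict String (PySem.Set Int))
    (hd : ∀ s i, i ∈ d.getD s PySem.Set.empty → i < n) (s : String) :
    (((PySem.List.enumerate records n).foldl pvOccStep d).getD s PySem.Set.empty)
      = d.getD s PySem.Set.empty ++ pvIdx records s n := by
  induction records generalizing n d with
  | nil => simp [PySem.List.enumerate_nil, pvIdx]
  | cons r rs ih =>
    rw [PySem.List.enumerate_cons, List.foldl_cons]
    have hstep : ∀ s', (pvOccStep d (n, r)).getD s' PySem.Set.empty
        = if s' ∈ r then PySem.Set.add (d.getD s' PySem.Set.empty) n
          else d.getD s' PySem.Set.empty := fun s' => pv_occInner_getD r n d s'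
    rw [ih (n + 1) _ ?_]
    · rw [hstep s]
      by_cases hs : s ∈ r
      · rw [if_pos hs, PySem.Set.add_of_not_mem (fun hmem => absurd (hd s n hmem) (by omega))]
        simp [pvIdx, hs]
      · simp [hs, pvIdx]
    · intro s' i hi
      rw [hstep s'] at hi
      split at hi
      · rcases (PySem.Set.mem_add _ _ _).mp hi with h | h
        · have := hd s' i h; omega
        · omega
      · have := hd s' i hi; omega

theorem pv_occ_getD0 (records : List (List String)) (s : String) :
    (((PySem.List.enumerate records 0).foldl pvOccStep PySem.Dict.empty).getD s PySem.Set.empty)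
      = pvIdx records s 0 := by
  rw [pv_occ_getD records 0 PySem.Dict.empty (by simp [PySem.Dict.getD_empty, PySem.Set.empty]) s]
  simp [PySem.Dict.getD_empty, PySem.Set.empty]

-- |occ[s] & occ[t]| counts the sessions containing both s and t
theorem pv_inter_count (records : List (List String)) (s t : String) (n : Int) :
    ((pvIdx records s n).filter (fun i => (pvIdx records t n).contains i)).length
      = pvN records s t := by
  induction records generalizing n with
  | nil => simp [pvIdx, pvN]
  | cons r rs ih =>
    have hmem : ∀ i : Int, ((pvIdx (r :: rs) t n).contains i = true)
        ↔ ((t ∈ r ∧ i = n) ∨ i ∈ pvIdx rs t (n + 1)) := by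
      intro i
      simp only [pvIdx, List.contains_eq_mem, List.mem_append, decide_eq_true_eq]
      by_cases ht : t ∈ r <;> simp [ht, eq_comm]
    have hhead : ((if s ∈ r then [n] else []).filter
        (fun i => (pvIdx (r :: rs) t n).contains i)).length
        = if s ∈ r ∧ t ∈ r then 1 else 0 := by
      by_cases hs : s ∈ r
      · rw [if_pos hs]
        have hnlb : n ∉ pvIdx rs t (n + 1) := fun h => by
          have := pv_idx_lb rs t (n + 1) n h; omega
        have hn : ((pvIdx (r :: rs) t n).contains n) = decide (t ∈ r) := by
          simp only [pvIdx, List.contains_eq_mem, List.mem_append]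
          by_cases ht : t ∈ r <;> simp [ht, hnlb]
        rw [List.filter_singleton, hn]
        by_cases ht : t ∈ r <;> simp [ht, hs]
      · simp [hs]
    have htail : ((pvIdx rs s (n + 1)).filter (fun i => (pvIdx (r :: rs) t n).contains i))
        = ((pvIdx rs s (n + 1)).filter (fun i => (pvIdx rs t (n + 1)).contains i)) := by
      apply List.filter_congr
      intro i hi
      have hb := pv_idx_lb rs s (n + 1) i hi
      rw [Bool.eq_iff_iff, hmem i, List.contains_eq_mem, decide_eq_true_eq]
      constructor
      · rintro (⟨-, rfl⟩ | h)
        · omega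
        · exact h
      · exact Or.inr
    rw [show pvIdx (r :: rs) s n = (if s ∈ r then [n] else []) ++ pvIdx rs s (n + 1) from rfl,
      List.filter_append, List.length_append, hhead, htail, ih (n + 1)]
    simp only [pvN, List.countP_cons]
    by_cases hs : s ∈ r
    · by_cases ht : t ∈ r
      · simp [hs, ht]
        omega
      · simp [hs, ht]
    · by_cases ht : t ∈ r <;> simp [hs, ht]

-- the keys of occ are exactly A's all_stores (same list)
theorem pv_occ_keys (records : List (List String)) (n : Int)
    (d : PySem.Dict String (PySem.Set Int)) :
    ((PySem.List.enumerate records n).foldl pvOccStep d).keys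
      = records.foldl (fun acc rec => rec.foldl (fun a s => PySem.Set.add a s) acc) d.keys := by
  induction records generalizing n d with
  | nil => simp [PySem.List.enumerate_nil]
  | cons r rs ih =>
    rw [PySem.List.enumerate_cons, List.foldl_cons, List.foldl_cons, ih]
    congr 1
    show (r.foldl (fun d s => d.modify s PySem.Set.empty
        (fun st => PySem.Set.add st n)) d).keys = _
    rw [PySem.Dict.keys_foldl_modify r PySem.Set.empty
      (fun _ _ st => PySem.Set.add st n) d]
    rfl

-- membership and nodup of A's all_stores fold
theorem pv_stores_mem (records : List (List String)) (a : PySem.Set String) (s : String) :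
    s ∈ records.foldl (fun acc rec => rec.foldl (fun a s => PySem.Set.add a s) acc) a
      ↔ s ∈ a ∨ ∃ r ∈ records, s ∈ r := by
  induction records generalizing a with
  | nil => simp
  | cons r rs ih =>
    simp only [List.foldl_cons]
    rw [ih]
    have : r.foldl (fun a s => PySem.Set.add a s) a = PySem.Set.update a r := rfl
    rw [this, PySem.Set.mem_update]
    simp only [List.mem_cons]
    constructor
    · rintro ((h | h) | ⟨r', hr', hs⟩)
      · exact Or.inl h
      · exact Or.inr ⟨r, Or.inl rfl, h⟩
      · exact Or.inr ⟨r', Or.inr hr', hs⟩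
    · rintro (h | ⟨r', (rfl | hr'), hs⟩)
      · exact Or.inl (Or.inl h)
      · exact Or.inl (Or.inr hs)
      · exact Or.inr ⟨r', hr', hs⟩

theorem pv_stores_nodup (records : List (List String)) (a : PySem.Set String)
    (ha : a.Nodup) :
    (records.foldl (fun acc rec => rec.foldl (fun a s => PySem.Set.add a s) acc) a).Nodup := by
  induction records generalizing a with
  | nil => exact ha
  | cons r rs ih =>
    simp only [List.foldl_cons]
    exact ih _ (PySem.Set.nodup_update a r ha)

-- ==== assembly ====

-- the per-store name lists agree
theorem pv_names_eq (records : List (List String)) (s : String) :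
    (let counts := records.foldl pvStepA PySem.Dict.empty
     let neighbors := counts.getD s PySem.Dict.empty
     (PySem.List.sorted2 neighbors.items (fun kv => -kv.2) (fun kv => kv.1)).map (fun kv => kv.1))
      = (let occ := (PySem.List.enumerate records 0).foldl pvOccStep PySem.Dict.empty
         let pairs := (occ.keys.filter (fun t => !(t == s))).map
           (fun t => (t, PySem.Set.len
             (PySem.Set.inter (occ.getD s PySem.Set.empty) (occ.getD t PySem.Set.empty))))
         let good := pairs.filter (fun kv => decide (0 < kv.2))
         (PySem.List.sorted2 good (fun kv => -kv.2) (fun kv => kv.1)).map (fun kv => kv.1)) := by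
  simp only
  have hkeys := pv_occ_keys records 0 PySem.Dict.empty
  have hknd : (((PySem.List.enumerate records 0).foldl pvOccStep PySem.Dict.empty).keys).Nodup := by
    rw [hkeys]; exact pv_stores_nodup records _ (by simp [PySem.Dict.keys_empty])
  have hlen : ∀ t : String, PySem.Set.len
      (PySem.Set.inter
        (((PySem.List.enumerate records 0).foldl pvOccStep PySem.Dict.empty).getD s PySem.Set.empty)
        (((PySem.List.enumerate records 0).foldl pvOccStep PySem.Dict.empty).getD t PySem.Set.empty))
      = (pvN records s t : Int) := by
    intro t
    rw [pv_occ_getD0, pv_occ_getD0]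
    show ((((pvIdx records s 0)).filter (fun i => (pvIdx records t 0).contains i)).length : Int) = _
    rw [pv_inter_count records s t 0]
  -- B's good list and A's items list are permutations of one another
  have hperm : (((((PySem.List.enumerate records 0).foldl pvOccStep PySem.Dict.empty).keys.filter
        (fun t => !(t == s))).map
          (fun t => (t, PySem.Set.len
            (PySem.Set.inter
              (((PySem.List.enumerate records 0).foldl pvOccStep PySem.Dict.empty).getD s PySem.Set.empty)
              (((PySem.List.enumerate records 0).foldl pvOccStep PySem.Dict.empty).getD t PySem.Set.empty))))).filter
          (fun kv => decide (0 < kv.2))).Perm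
        (((records.foldl pvStepA PySem.Dict.empty).getD s PySem.Dict.empty).items) := by
    have hand : (((records.foldl pvStepA PySem.Dict.empty).getD s PySem.Dict.empty).keys).Nodup :=
      pv_countsA_nodup records PySem.Dict.empty s (by simp)
    apply (List.perm_ext_iff_of_nodup ?_ ?_).mpr
    · rintro ⟨t, v⟩
      rw [← PySem.Dict.get?_eq_some_iff_mem_items _ _ _ hand, pv_countsA_get?]
      simp only [List.mem_filter, List.mem_map]
      constructor
      · rintro ⟨⟨t', ht', heq⟩, hpos⟩
        injection heq with h1 h2
        subst h1; subst h2
        rw [hlen t'] at hpos ⊢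
        simp only [Bool.not_eq_eq_eq_not, Bool.not_true, beq_eq_false_iff_ne] at ht'
        have hne : s ≠ t' := fun h => ht'.2 h.symm
        rw [if_pos ⟨hne, by simpa using hpos⟩]
      · intro hsome
        split at hsome
        · rename_i hc
          obtain ⟨hne, hpos⟩ := hc
          obtain rfl : v = (pvN records s t : Int) := (Option.some.injEq .. ▸ hsome).symm
          refine ⟨⟨t, ?_, by rw [hlen t]⟩, by simpa using hpos⟩
          simp only [Bool.not_eq_eq_eq_not, Bool.not_true, beq_eq_false_iff_ne]
          refine ⟨?_, fun h => hne h.symm⟩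
          rw [hkeys, pv_stores_mem]
          right
          obtain ⟨r, hr, hmem⟩ : ∃ r ∈ records, s ∈ r ∧ t ∈ r := by
            have : 0 < records.countP (fun rec => decide (s ∈ rec) && decide (t ∈ rec)) := hpos
            rw [List.countP_pos_iff] at this
            obtain ⟨r, hr, hp⟩ := this
            exact ⟨r, hr, by simpa using hp⟩
          exact ⟨r, hr, hmem.2⟩
        · simp at hsome
    · apply List.Nodup.filter
      refine List.Nodup.map ?_ (hknd.filter _)
      intro a b h
      simpa using congrArg Prod.fst h
    · have : (((records.foldl pvStepA PySem.Dict.empty).getD s PySem.Dict.empty).items.map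
          Prod.fst).Nodup := hand
      exact this.of_map
  rw [pv_sorted2_eq, pv_sorted2_eq,
    PySem.List.sorted_eq_sorted_of_perm _ _ _ pv_key_inj hperm]

-- ===== VERDICT (by name: the statement is the Claim_ definition above) =====
theorem shopping_patterns_dict_spec : Claim_equal_shopping_patterns_dict := by
  intro records _
  show shopping_patterns_dict records = shopping_patterns_dict_alt records
  simp only [shopping_patterns_dict, shopping_patterns_dict_alt]
  rw [pv_occ_keys records 0 PySem.Dict.empty]
  have hkeq : (PySem.Dict.empty : PySem.Dict String (PySem.Set Int)).keys = PySem.Set.empty := rfl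
  rw [hkeq]
  by_cases hempty :
      records.foldl (fun acc rec => rec.foldl (fun a s => PySem.Set.add a s) acc) PySem.Set.empty = []
  · rw [if_pos hempty, hempty]
    rfl
  · rw [if_neg hempty]
    -- A's fold: the emptiness branch collapses, both folds become maps over the same sorted list
    have hfunA : ∀ (res : List (String × List String)) (store : String),
        (let neighbors := (records.foldl pvStepA PySem.Dict.empty).getD store PySem.Dict.empty
         if neighbors.items = [] then res ++ [(store, [])]
         else res ++ [(store,
           (PySem.List.sorted2 neighbors.items (fun kv => -kv.2) (fun kv => kv.1)).map
             (fun kv => kv.1))])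
        = res ++ [(store,
            (PySem.List.sorted2
              ((records.foldl pvStepA PySem.Dict.empty).getD store PySem.Dict.empty).items
              (fun kv => -kv.2) (fun kv => kv.1)).map (fun kv => kv.1))] := by
      intro res store
      by_cases h : ((records.foldl pvStepA PySem.Dict.empty).getD store PySem.Dict.empty).items = []
      · simp only [h, if_pos]
        rfl
      · simp [h]
    rw [show (fun (res : List (String × List String)) (store : String) =>
        (let neighbors := (records.foldl pvStepA PySem.Dict.empty).getD store PySem.Dict.empty
         if neighbors.items = [] then res ++ [(store, [])]
         else res ++ [(store,
           (PySem.List.sorted2 neighbors.items (fun kv => -kv.2) (fun kv => kv.1)).map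
             (fun kv => kv.1))]))
        = (fun res store => res ++ [(store,
            (PySem.List.sorted2
              ((records.foldl pvStepA PySem.Dict.empty).getD store PySem.Dict.empty).items
              (fun kv => -kv.2) (fun kv => kv.1)).map (fun kv => kv.1))])
      from funext fun res => funext fun store => hfunA res store]
    rw [PySem.List.foldl_append_singleton_eq_map, PySem.List.foldl_append_singleton_eq_map]
    simp only [List.nil_append]
    apply List.map_congr_left
    intro s _
    have := pv_names_eq records s
    simp only at this
    rw [this, pv_occ_keys records 0 PySem.Dict.empty, hkeq]
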